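-- pv_equiv track=rewrite | github.com/kasperengelen/Project-Databases-2Ba-INF- | client/Controller/DatasetHistoryManager.py | __python_list_to_postgres_array
-- ===== SOURCE A (Python) =====
-- def __python_list_to_postgres_array(py_list, transformation_type):
--     """Method that represents a python list as a postgres array for inserting into a PostreSQL database."""
--     param_array = ""
--     nr_elements = len(py_list)
--
--     if nr_elements == 0: #Return an empty postgres array string
--         return "{}"
--     """
--     if 15 < transformation_type < 17: #Arguments for transformation 15 and 16 are already quoted
--         param_array = "{" + py_list[0] + "}"
--         return param_array"""
--
--     param_array = "{}"
--     if nr_elements > 1: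
--         for i in range(nr_elements-1):
--             param_array += ", {}"
--
--     param_array = param_array.format(*py_list)
--     param_array = "{" + param_array  + "}"
--
--     return param_array
-- ===== SOURCE B (Python) =====
-- def __python_list_to_postgres_array(py_list, transformation_type):
--     """Represent a python list as a postgres array string: one direct join, no template pass."""
--     return "{" + ", ".join(str(x) for x in py_list) + "}"
-- ===== Notes on version B (the rewrite author's own statement) =====
-- stated objective: simpler
-- what changed: Replaces A's two-pass scheme (build a '{}, {}, ...' placeholder template in a loop, then fill it with .format(*py_list)) by one direct ', '.join over the elements; the empty-list guard disappears because the join yields '{}' naturally.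
import Mathlib
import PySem

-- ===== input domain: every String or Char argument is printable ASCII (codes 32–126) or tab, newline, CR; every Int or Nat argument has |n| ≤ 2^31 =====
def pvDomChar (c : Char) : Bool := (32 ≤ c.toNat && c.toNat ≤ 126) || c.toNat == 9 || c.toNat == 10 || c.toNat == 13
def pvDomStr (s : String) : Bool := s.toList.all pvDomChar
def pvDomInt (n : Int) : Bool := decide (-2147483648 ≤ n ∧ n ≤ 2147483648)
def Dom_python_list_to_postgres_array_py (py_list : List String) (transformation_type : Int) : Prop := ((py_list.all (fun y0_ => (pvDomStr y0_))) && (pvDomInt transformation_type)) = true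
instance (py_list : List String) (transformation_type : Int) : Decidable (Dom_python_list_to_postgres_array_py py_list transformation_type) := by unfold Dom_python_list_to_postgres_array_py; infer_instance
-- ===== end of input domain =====

-- B replaces A's two passes (build a '{}, {}, ...' placeholder template, then fill it with
-- .format(*py_list)) by one direct ', '.join over the elements — simpler, same result.

-- ===== PORT A =====
-- Hand-port of str.format with positional auto '{}' placeholders; exact here because the
-- template A builds consists only of '{}' placeholders and ', ' separators (no other braces).
def pvFmt : List Char → List String → List Char
  | '{' :: '}' :: rest, a :: args => a.toList ++ pvFmt rest args
  | c :: rest, args => c :: pvFmt rest args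
  | [], _ => []

def python_list_to_postgres_array_py (py_list : List String) (transformation_type : Int) : String :=
  let nr_elements : Int := py_list.length
  if nr_elements == 0 then "{}"
  else
    let param_array : String :=
      if nr_elements > 1 then
        List.foldl (fun s _ => s ++ ", {}") "{}" (PySem.List.pyRange 0 (nr_elements - 1) 1)
      else "{}"
    let param_array := String.ofList (pvFmt param_array.toList py_list)
    "{" ++ param_array ++ "}"

-- ===== PORT B =====
def python_list_to_postgres_array_py_alt (py_list : List String) (transformation_type : Int) : String :=
  "{" ++ PySem.Str.join ", " py_list ++ "}"

-- ===== PRECONDITION & SPEC =====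
def Spec_python_list_to_postgres_array_py (py_list : List String) (transformation_type : Int) (out : String) : Prop := out = python_list_to_postgres_array_py_alt py_list transformation_type
instance (py_list : List String) (transformation_type : Int) (out : String) : Decidable (Spec_python_list_to_postgres_array_py py_list transformation_type out) := by unfold Spec_python_list_to_postgres_array_py; infer_instance

-- ===== CLAIM (what is proved, stated in full; the proofs are below) =====
def Claim_equal_python_list_to_postgres_array_py : Prop := ∀ (py_list : List String) (transformation_type : Int), Dom_python_list_to_postgres_array_py py_list transformation_type → Spec_python_list_to_postgres_array_py py_list transformation_type (python_list_to_postgres_array_py py_list transformation_type)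

-- ===== LEMMAS AND PROOFS =====

-- the template foldl produces "{}" followed by l.length copies of ", {}"
theorem pv_foldl_tmpl (l : List Int) (s : String) :
    List.foldl (fun s _ => s ++ ", {}") s l
      = String.ofList (s.toList ++ (List.replicate l.length (", {}".toList)).flatten) := by
  induction l generalizing s with
  | nil => simp
  | cons x l ih =>
      simp only [List.foldl_cons, ih]
      simp [List.replicate_succ, String.toList_append, List.append_assoc]

theorem pvFmt_comma (rest : List Char) (args : List String) :
    pvFmt (',' :: rest) args = ',' :: pvFmt rest args := rfl

theorem pvFmt_space (rest : List Char) (args : List String) :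
    pvFmt (' ' :: rest) args = ' ' :: pvFmt rest args := rfl

-- formatting the full template = join on char lists
theorem pv_fmt_join (a : String) (args : List String) :
    pvFmt ('{' :: '}' :: (List.replicate args.length (", {}".toList)).flatten) (a :: args)
      = PySem.Chars.join (", ".toList) ((a :: args).map String.toList) := by
  induction args generalizing a with
  | nil => simp [pvFmt, PySem.Chars.join, List.intercalate]
  | cons b args ih =>
      simp only [List.length_cons, List.replicate_succ, List.flatten_cons, pvFmt, List.map_cons]
      rw [show (", {}".toList) ++ (List.replicate args.length (", {}".toList)).flatten
            = ',' :: ' ' :: '{' :: '}' :: (List.replicate args.length (", {}".toList)).flatten from rfl]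
      rw [pvFmt_comma, pvFmt_space, ih b]
      simp [PySem.Chars.join, List.intercalate, List.intersperse]

-- ===== VERDICT (by name: the statement is the Claim_ definition above) =====
theorem python_list_to_postgres_array_py_spec : Claim_equal_python_list_to_postgres_array_py := by
  intro py_list transformation_type _
  unfold Spec_python_list_to_postgres_array_py python_list_to_postgres_array_py python_list_to_postgres_array_py_alt
  cases py_list with
  | nil => simp [PySem.Str.join]
  | cons a args =>
      cases args with
      | nil =>
          simp [pvFmt, PySem.Str.join, PySem.Chars.join, List.intercalate,
            String.ofList_toList]
      | cons b args' =>
          have hlen : ((((a :: b :: args').length : Int)) == 0) = false := by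
            simp; omega
          have hgt : (((a :: b :: args').length : Int) > 1) = True := by
            simp only [List.length_cons]; simp
          simp only [hlen, Bool.false_eq_true, if_false, hgt, if_true]
          have hr : (PySem.List.pyRange 0 (((a :: b :: args').length : Int) - 1) 1).length
              = (b :: args').length := by
            rw [PySem.List.length_pyRange_one]
            simp only [List.length_cons]
            omega
          rw [pv_foldl_tmpl, hr, String.toList_ofList]
          rw [show ("{}".toList ++ (List.replicate (b :: args').length (", {}".toList)).flatten)
                = '{' :: '}' :: (List.replicate (b :: args').length (", {}".toList)).flatten from rfl]
          rw [pv_fmt_join, ← PySem.Str.toList_join, String.ofList_toList]
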